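-- pv_equiv track=rewrite | github.com/GRAYgoose124/pyrology | src/future_algebra/lexer.py | get_first_comma_not_in_parens
-- ===== SOURCE A (Python) =====
-- def get_first_comma_not_in_parens(string):
--     """Get the index of the first comma not in parentheses."""
--     parens = 0
--     for i, c in enumerate(string):
--         if c == '(':
--             parens += 1
--         elif c == ')':
--             parens -= 1
--         elif c == ',' and parens == 0:
--             return i
-- ===== SOURCE B (Python) =====
-- def get_first_comma_not_in_parens(string):
--     """Get the index of the first comma not in parentheses."""
--     # Pass 1: depth profile; depths[i] = paren depth BEFORE character i.
--     depths = [0]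
--     for c in string:
--         depths.append(depths[-1] + (c == '(') - (c == ')'))
--     # Pass 2: search the (char, depth) table.
--     for i, (c, d) in enumerate(zip(string, depths)):
--         if c == ',' and d == 0:
--             return i
--     return None
-- ===== Notes on version B (the rewrite author's own statement) =====
-- stated objective: alternative
-- what changed: Replaces the single interleaved scan with two passes: first build a cumulative parenthesis-depth table (depth before each character), then search the zipped (char, depth) table for the first comma at depth 0.
import Mathlib
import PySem

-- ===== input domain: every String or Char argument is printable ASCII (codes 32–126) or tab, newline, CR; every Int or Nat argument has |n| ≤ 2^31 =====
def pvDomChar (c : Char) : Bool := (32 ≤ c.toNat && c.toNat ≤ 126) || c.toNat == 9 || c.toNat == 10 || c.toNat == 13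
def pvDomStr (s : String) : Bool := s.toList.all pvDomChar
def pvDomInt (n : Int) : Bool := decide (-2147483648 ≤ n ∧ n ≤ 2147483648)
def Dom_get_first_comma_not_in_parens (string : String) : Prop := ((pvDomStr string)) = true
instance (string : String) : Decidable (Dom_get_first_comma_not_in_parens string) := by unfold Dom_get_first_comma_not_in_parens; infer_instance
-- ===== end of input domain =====

-- B replaces A's single interleaved depth-tracking scan with two passes: a cumulative
-- depth table built first, then a search over the zipped (char, depth) table (alternative decomposition).


-- ===== PORT A =====
-- A's loop: enumerate, one running 'parens' counter, early return on a depth-0 comma.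
def pvALoop : List Char → Int → Int → Option Int
  | [], _, _ => none
  | c :: rest, i, parens =>
    if c = '(' then pvALoop rest (i + 1) (parens + 1)
    else if c = ')' then pvALoop rest (i + 1) (parens - 1)
    else if c = ',' ∧ parens = 0 then some i
    else pvALoop rest (i + 1) parens

def get_first_comma_not_in_parens (string : String) : Option Int :=
  pvALoop string.toList 0 0

-- ===== PORT B =====
-- Pass 1 (Source B's depths loop as structural recursion): depth before each character.
def pvDepths : List Char → Int → List Int
  | [], d => [d]
  | c :: rest, d =>
    d :: pvDepths rest (d + (if c = '(' then 1 else 0) - (if c = ')' then 1 else 0))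

-- Pass 2: search the zipped (char, depth) table.
def pvBFind : List (Char × Int) → Int → Option Int
  | [], _ => none
  | (c, d) :: rest, i => if c = ',' ∧ d = 0 then some i else pvBFind rest (i + 1)

def get_first_comma_not_in_parens_alt (string : String) : Option Int :=
  pvBFind (string.toList.zip (pvDepths string.toList 0)) 0

-- ===== PRECONDITION & SPEC =====
def Spec_get_first_comma_not_in_parens (string : String) (out : Option Int) : Prop := out = get_first_comma_not_in_parens_alt string
instance (string : String) (out : Option Int) : Decidable (Spec_get_first_comma_not_in_parens string out) := by unfold Spec_get_first_comma_not_in_parens; infer_instance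

-- ===== CLAIM (what is proved, stated in full; the proofs are below) =====
def Claim_equal_get_first_comma_not_in_parens : Prop := ∀ (string : String), Dom_get_first_comma_not_in_parens string → Spec_get_first_comma_not_in_parens string (get_first_comma_not_in_parens string)

-- ===== LEMMAS AND PROOFS =====
theorem pvLoop_eq (cs : List Char) : ∀ (i d : Int),
    pvALoop cs i d = pvBFind (cs.zip (pvDepths cs d)) i := by
  induction cs with
  | nil => intro i d; rfl
  | cons c rest ih =>
    intro i d
    simp only [pvDepths, List.zip_cons_cons, pvBFind, pvALoop]
    by_cases h1 : c = '('
    · simp [h1, ih]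
    · by_cases h2 : c = ')'
      · simp [h1, h2, ih]
      · by_cases h3 : c = ',' ∧ d = 0
        · simp [h1, h2, h3]
        · simp [h1, h2, h3, ih]

-- ===== VERDICT (by name: the statement is the Claim_ definition above) =====
theorem get_first_comma_not_in_parens_spec : Claim_equal_get_first_comma_not_in_parens := by
  intro s _
  unfold Spec_get_first_comma_not_in_parens get_first_comma_not_in_parens get_first_comma_not_in_parens_alt
  exact pvLoop_eq s.toList 0 0
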